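-- pv_equiv track=rewrite | github.com/shfosem/algorithm | programmers/level1/046.py | solution
-- ===== SOURCE A (Python) =====
-- def solution(answers):
--     answer = [0,0,0]
--     num1 = [1,2,3,4,5]
--     num2 = [2,1,2,3,2,4,2,5]
--     num3 = [3,3,1,1,2,2,4,4,5,5]
--
--     for i in range(len(answers)):
--         if answers[i]==num1[i%5]:
--             answer[0]+=1
--         if answers[i]==num2[i%8]:
--             answer[1]+=1
--         if answers[i]==num3[i%10]:
--             answer[2]+=1
--
--     maxScore = max(answer)
--     winner=[]
--
--     for i in range(len(answer)):
--         if maxScore==answer[i]: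
--             winner.append(i+1)
--
--     return winner
-- ===== SOURCE B (Python) =====
-- def solution(answers):
--     # The three patterns all repeat with period lcm(5,8,10) = 40, so the answer
--     # value together with the position's residue mod 40 determines every match.
--     # One pass builds a frequency table keyed by (i % 40, answer); the scores are
--     # then read off the table without rescanning answers.
--     PERIOD = 40
--     freq = {}
--     for i, a in enumerate(answers):
--         key = (i % PERIOD, a)
--         freq[key] = freq.get(key, 0) + 1
--     patterns = [[1, 2, 3, 4, 5],
--                 [2, 1, 2, 3, 2, 4, 2, 5],
--                 [3, 3, 1, 1, 2, 2, 4, 4, 5, 5]]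
--     scores = [sum(freq.get((r, p[r % len(p)]), 0) for r in range(PERIOD))
--               for p in patterns]
--     best = max(scores)
--     return [k + 1 for k, s in enumerate(scores) if s == best]
-- ===== Notes on version B (the rewrite author's own statement) =====
-- stated objective: alternative
-- what changed: A compares every answer against all three patterns in one fused loop; B instead builds a frequency table keyed by (position mod 40, answer) in one pass (40 = lcm of the pattern lengths) and then computes each score by 40 table lookups, so no per-element pattern comparison remains.
import Mathlib
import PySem

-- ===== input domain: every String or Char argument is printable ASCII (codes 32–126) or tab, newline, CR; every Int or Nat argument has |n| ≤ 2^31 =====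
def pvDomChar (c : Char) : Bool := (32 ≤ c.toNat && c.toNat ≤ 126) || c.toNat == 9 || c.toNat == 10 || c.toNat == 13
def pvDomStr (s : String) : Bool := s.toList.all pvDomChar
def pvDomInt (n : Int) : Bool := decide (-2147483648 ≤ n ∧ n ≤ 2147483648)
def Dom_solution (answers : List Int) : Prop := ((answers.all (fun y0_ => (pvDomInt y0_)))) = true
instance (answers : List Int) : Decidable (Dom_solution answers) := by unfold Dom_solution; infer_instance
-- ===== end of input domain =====

-- B replaces A's fused per-element comparison loop by a frequency table keyed by
-- (position mod 40, answer) built in one pass (40 = lcm of the pattern lengths);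
-- each score is then 40 table lookups; objective: alternative.

-- ===== PORT A =====
def num1A : List Int := [1, 2, 3, 4, 5]
def num2A : List Int := [2, 1, 2, 3, 2, 4, 2, 5]
def num3A : List Int := [3, 3, 1, 1, 2, 2, 4, 4, 5, 5]

def solution (answers : List Int) : List Int :=
  let s := (PySem.List.pyRange 0 (PySem.List.len answers) 1).foldl
    (fun (acc : Int × Int × Int) i =>
      let acc := if PySem.List.pyGetD answers i 0 = PySem.List.pyGetD num1A (PySem.Int.mod i 5) 0
                 then (acc.1 + 1, acc.2.1, acc.2.2) else acc
      let acc := if PySem.List.pyGetD answers i 0 = PySem.List.pyGetD num2A (PySem.Int.mod i 8) 0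
                 then (acc.1, acc.2.1 + 1, acc.2.2) else acc
      if PySem.List.pyGetD answers i 0 = PySem.List.pyGetD num3A (PySem.Int.mod i 10) 0
      then (acc.1, acc.2.1, acc.2.2 + 1) else acc)
    (0, 0, 0)
  let answer : List Int := [s.1, s.2.1, s.2.2]
  let maxScore := (PySem.List.max? answer (fun y => y)).getD 0
  (PySem.List.pyRange 0 (PySem.List.len answer) 1).foldl
    (fun w i => if maxScore = PySem.List.pyGetD answer i 0 then w ++ [i + 1] else w) []

-- ===== PORT B =====
def patternsB : List (List Int) := [[1, 2, 3, 4, 5], [2, 1, 2, 3, 2, 4, 2, 5], [3, 3, 1, 1, 2, 2, 4, 4, 5, 5]]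

def solution_alt (answers : List Int) : List Int :=
  let freq := (PySem.List.enumerate answers 0).foldl
    (fun (d : PySem.Dict (Int × Int) Int) ia =>
      d.insert (PySem.Int.mod ia.1 40, ia.2)
        (d.getD (PySem.Int.mod ia.1 40, ia.2) 0 + 1)) PySem.Dict.empty
  let scores := patternsB.map (fun p =>
    ((PySem.List.pyRange 0 40 1).map
      (fun r => freq.getD (r, PySem.List.pyGetD p (PySem.Int.mod r (PySem.List.len p)) 0) 0)).sum)
  let best := (PySem.List.max? scores (fun y => y)).getD 0
  ((PySem.List.enumerate scores 0).filter (fun q => q.2 == best)).map (fun q => q.1 + 1)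

-- ===== PRECONDITION & SPEC =====
def Spec_solution (answers : List Int) (out : List Int) : Prop := out = solution_alt answers
instance (answers : List Int) (out : List Int) : Decidable (Spec_solution answers out) := by unfold Spec_solution; infer_instance

-- ===== CLAIM (what is proved, stated in full; the proofs are below) =====
def Claim_equal_solution : Prop := ∀ (answers : List Int), Dom_solution answers → Spec_solution answers (solution answers)

-- ===== LEMMAS AND PROOFS =====

-- the fused A-loop over (index, element) pairs computes the three per-pattern scores at once
theorem fused_loop_eq_scores (p1 p2 p3 : List Int) (m1 m2 m3 : Int)
    (xs : List Int) : ∀ (s a b c : Int),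
    (PySem.List.enumerate xs s).foldl
      (fun (acc : Int × Int × Int) ia =>
        let acc := if ia.2 = PySem.List.pyGetD p1 (PySem.Int.mod ia.1 m1) 0
                   then (acc.1 + 1, acc.2.1, acc.2.2) else acc
        let acc := if ia.2 = PySem.List.pyGetD p2 (PySem.Int.mod ia.1 m2) 0
                   then (acc.1, acc.2.1 + 1, acc.2.2) else acc
        if ia.2 = PySem.List.pyGetD p3 (PySem.Int.mod ia.1 m3) 0
        then (acc.1, acc.2.1, acc.2.2 + 1) else acc)
      (a, b, c)
    = (a + ((PySem.List.enumerate xs s).map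
              (fun ia => if ia.2 = PySem.List.pyGetD p1 (PySem.Int.mod ia.1 m1) 0 then (1 : Int) else 0)).sum,
       b + ((PySem.List.enumerate xs s).map
              (fun ia => if ia.2 = PySem.List.pyGetD p2 (PySem.Int.mod ia.1 m2) 0 then (1 : Int) else 0)).sum,
       c + ((PySem.List.enumerate xs s).map
              (fun ia => if ia.2 = PySem.List.pyGetD p3 (PySem.Int.mod ia.1 m3) 0 then (1 : Int) else 0)).sum) := by
  induction xs with
  | nil => intro s a b c; simp [PySem.List.enumerate_nil]
  | cons x xs ih =>
      intro s a b c
      simp only [PySem.List.enumerate_cons, List.foldl_cons, List.map_cons, List.sum_cons]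
      split_ifs <;> simp only [ih] <;> refine Prod.ext ?_ (Prod.ext ?_ ?_) <;> simp <;> ring

-- no other residue than m contributes to the indicator sum
theorem sum_ind_zero (v : Int → Int) (x m : Int) (l : List Int) (h : m ∉ l) :
    (l.map (fun r => if ((m, x) : Int × Int) = (r, v r) then (1 : Int) else 0)).sum = 0 := by
  apply List.sum_eq_zero
  intro y hy
  rcases List.mem_map.1 hy with ⟨r, hr, rfl⟩
  have hmr : m ≠ r := fun hmr => h (hmr ▸ hr)
  simp [Prod.mk.injEq, hmr]

-- a residue list containing m exactly once turns the indicator sum into the single match test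
theorem sum_ind_one (v : Int → Int) (x m : Int) (l : List Int)
    (hnd : l.Nodup) (hm : m ∈ l) :
    (l.map (fun r => if ((m, x) : Int × Int) = (r, v r) then (1 : Int) else 0)).sum
      = if x = v m then 1 else 0 := by
  induction l with
  | nil => cases hm
  | cons a l ih =>
      rcases List.mem_cons.1 hm with rfl | hm'
      · have hnotin : m ∉ l := (List.nodup_cons.1 hnd).1
        simp only [List.map_cons, List.sum_cons, sum_ind_zero v x m l hnotin]
        by_cases hx : x = v m <;> simp [hx, Prod.ext_iff]
      · have hma : m ≠ a := fun he => (List.nodup_cons.1 hnd).1 (he ▸ hm')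
        simp only [List.map_cons, List.sum_cons,
          ih (List.nodup_cons.1 hnd).2 hm']
        simp [Prod.ext_iff, hma]

-- the 40 bucket counts of one pattern sum to that pattern's match count
theorem bucket_sum (v : Int → Int) (xs : List Int) : ∀ (s : Int),
    ((PySem.List.pyRange 0 40 1).map
      (fun r => (((PySem.List.enumerate xs s).map
          (fun ia => ((PySem.Int.mod ia.1 40, ia.2) : Int × Int))).count (r, v r) : Int))).sum
    = ((PySem.List.enumerate xs s).map
        (fun ia => if ia.2 = v (PySem.Int.mod ia.1 40) then (1 : Int) else 0)).sum := by
  induction xs with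
  | nil => intro s; simp [PySem.List.enumerate_nil]
  | cons x xs ih =>
      intro s
      have hm : PySem.Int.mod s 40 ∈ PySem.List.pyRange 0 40 1 := by
        rw [PySem.List.mem_pyRange_one]
        exact ⟨PySem.Int.mod_nonneg s (by norm_num), PySem.Int.mod_lt s (by norm_num)⟩
      simp only [PySem.List.enumerate_cons, List.map_cons, List.sum_cons, List.count_cons]
      have hsplit :
          ((PySem.List.pyRange 0 40 1).map
            (fun r => ((((PySem.List.enumerate xs (s+1)).map
                (fun ia => ((PySem.Int.mod ia.1 40, ia.2) : Int × Int))).count (r, v r)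
              + if ((PySem.Int.mod s 40, x) : Int × Int) = (r, v r) then 1 else 0 : Nat) : Int))).sum
          = ((PySem.List.pyRange 0 40 1).map
              (fun r => (((PySem.List.enumerate xs (s+1)).map
                (fun ia => ((PySem.Int.mod ia.1 40, ia.2) : Int × Int))).count (r, v r) : Int))).sum
            + ((PySem.List.pyRange 0 40 1).map
              (fun r => if ((PySem.Int.mod s 40, x) : Int × Int) = (r, v r) then (1 : Int) else 0)).sum := by
        rw [← List.sum_map_add]
        apply congrArg
        apply List.map_congr_left
        intro r _
        push_cast
        split_ifs <;> simp
      simp only [beq_iff_eq]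
      rw [hsplit, ih (s+1),
        sum_ind_one v x (PySem.Int.mod s 40) _ (PySem.List.nodup_pyRange_one 0 40) hm]
      ring

-- reducing mod 40 first does not change a residue mod a divisor of 40
theorem mod_mod_40 (i L : Int) (hL : 0 < L) (hdvd : L ∣ 40) :
    PySem.Int.mod (PySem.Int.mod i 40) L = PySem.Int.mod i L := by
  rw [PySem.Int.mod_eq_emod_of_pos (by norm_num : (0:Int) < 40),
      PySem.Int.mod_eq_emod_of_pos hL, PySem.Int.mod_eq_emod_of_pos hL]
  exact Int.emod_emod_of_dvd i hdvd

-- the three-counter update over the 3-element score list is the enumerate/filter/map comprehension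
theorem winners_eq (S1 S2 S3 M : Int) :
    (PySem.List.pyRange 0 (PySem.List.len [S1, S2, S3]) 1).foldl
      (fun w i => if M = PySem.List.pyGetD [S1, S2, S3] i 0 then w ++ [i + 1] else w) []
    = ((PySem.List.enumerate [S1, S2, S3] 0).filter (fun q => q.2 == M)).map (fun q => q.1 + 1) := by
  have h3 : PySem.List.pyRange 0 (PySem.List.len ([S1, S2, S3] : List Int)) 1 = [0, 1, 2] := by
    simp [PySem.List.len_eq]; rfl
  rw [h3]
  simp only [List.foldl_cons, List.foldl_nil, PySem.List.enumerate_cons, PySem.List.enumerate_nil,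
    List.filter_cons, List.filter_nil, beq_iff_eq]
  simp only [pysem]
  by_cases h1 : S1 = M <;> by_cases h2 : S2 = M <;> by_cases h3 : S3 = M <;>
    simp [h1, h2, h3, eq_comm]

-- B's score for one pattern equals the direct match count of that pattern
theorem score_eq (p : List Int) (L : Int) (hL : 0 < L) (hdvd : L ∣ 40)
    (hlen : PySem.List.len p = L) (answers : List Int) :
    ((PySem.List.pyRange 0 40 1).map
      (fun r => ((PySem.List.enumerate answers 0).foldl
        (fun (d : PySem.Dict (Int × Int) Int) ia =>
          d.insert (PySem.Int.mod ia.1 40, ia.2)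
            (d.getD (PySem.Int.mod ia.1 40, ia.2) 0 + 1)) PySem.Dict.empty).getD
        (r, PySem.List.pyGetD p (PySem.Int.mod r (PySem.List.len p)) 0) 0)).sum
    = ((PySem.List.enumerate answers 0).map
        (fun ia => if ia.2 = PySem.List.pyGetD p (PySem.Int.mod ia.1 L) 0 then (1 : Int) else 0)).sum := by
  have hfold :
      (PySem.List.enumerate answers 0).foldl
        (fun (d : PySem.Dict (Int × Int) Int) ia =>
          d.insert (PySem.Int.mod ia.1 40, ia.2)
            (d.getD (PySem.Int.mod ia.1 40, ia.2) 0 + 1)) PySem.Dict.empty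
      = ((PySem.List.enumerate answers 0).map
          (fun ia => ((PySem.Int.mod ia.1 40, ia.2) : Int × Int))).foldl
          (fun (d : PySem.Dict (Int × Int) Int) k => d.insert k (d.getD k 0 + 1)) PySem.Dict.empty := by
    rw [List.foldl_map]
  rw [hfold, hlen]
  have hget : ∀ r v, (((PySem.List.enumerate answers 0).map
        (fun ia => ((PySem.Int.mod ia.1 40, ia.2) : Int × Int))).foldl
        (fun (d : PySem.Dict (Int × Int) Int) k => d.insert k (d.getD k 0 + 1))
          PySem.Dict.empty).getD (r, v) 0
      = (((PySem.List.enumerate answers 0).map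
          (fun ia => ((PySem.Int.mod ia.1 40, ia.2) : Int × Int))).count (r, v) : Int) := by
    intro r v
    rw [PySem.Dict.getD_foldl_insert_add_one]
    simp [PySem.Dict.getD_empty]
  calc ((PySem.List.pyRange 0 40 1).map
      (fun r => (((PySem.List.enumerate answers 0).map
          (fun ia => ((PySem.Int.mod ia.1 40, ia.2) : Int × Int))).foldl
          (fun (d : PySem.Dict (Int × Int) Int) k => d.insert k (d.getD k 0 + 1))
            PySem.Dict.empty).getD (r, PySem.List.pyGetD p (PySem.Int.mod r L) 0) 0)).sum
      = ((PySem.List.pyRange 0 40 1).map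
          (fun r => (((PySem.List.enumerate answers 0).map
            (fun ia => ((PySem.Int.mod ia.1 40, ia.2) : Int × Int))).count
              (r, PySem.List.pyGetD p (PySem.Int.mod r L) 0) : Int))).sum := by
        apply congrArg; apply List.map_congr_left; intro r _; exact hget r _
    _ = ((PySem.List.enumerate answers 0).map
          (fun ia => if ia.2 = PySem.List.pyGetD p (PySem.Int.mod (PySem.Int.mod ia.1 40) L) 0
                     then (1 : Int) else 0)).sum :=
        bucket_sum (fun r => PySem.List.pyGetD p (PySem.Int.mod r L) 0) answers 0
    _ = ((PySem.List.enumerate answers 0).map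
          (fun ia => if ia.2 = PySem.List.pyGetD p (PySem.Int.mod ia.1 L) 0 then (1 : Int) else 0)).sum := by
        apply congrArg; apply List.map_congr_left; intro ia _
        rw [mod_mod_40 ia.1 L hL hdvd]

-- ===== VERDICT (by name: the statement is the Claim_ definition above) =====
theorem solution_spec : Claim_equal_solution := by
  intro answers _
  show solution answers = solution_alt answers
  unfold solution solution_alt
  have hA := fused_loop_eq_scores num1A num2A num3A 5 8 10 answers 0 0 0 0
  simp only [zero_add] at hA
  have key : (PySem.List.enumerate answers 0).foldl
      (fun (acc : Int × Int × Int) ia =>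
        let acc := if ia.2 = PySem.List.pyGetD num1A (PySem.Int.mod ia.1 5) 0
                   then (acc.1 + 1, acc.2.1, acc.2.2) else acc
        let acc := if ia.2 = PySem.List.pyGetD num2A (PySem.Int.mod ia.1 8) 0
                   then (acc.1, acc.2.1 + 1, acc.2.2) else acc
        if ia.2 = PySem.List.pyGetD num3A (PySem.Int.mod ia.1 10) 0
        then (acc.1, acc.2.1, acc.2.2 + 1) else acc)
      (0, 0, 0)
      = (PySem.List.pyRange 0 (PySem.List.len answers) 1).foldl
      (fun (acc : Int × Int × Int) i =>
        let acc := if PySem.List.pyGetD answers i 0 = PySem.List.pyGetD num1A (PySem.Int.mod i 5) 0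
                   then (acc.1 + 1, acc.2.1, acc.2.2) else acc
        let acc := if PySem.List.pyGetD answers i 0 = PySem.List.pyGetD num2A (PySem.Int.mod i 8) 0
                   then (acc.1, acc.2.1 + 1, acc.2.2) else acc
        if PySem.List.pyGetD answers i 0 = PySem.List.pyGetD num3A (PySem.Int.mod i 10) 0
        then (acc.1, acc.2.1, acc.2.2 + 1) else acc)
      (0, 0, 0) := by
    rw [PySem.List.enumerate_eq_map_pyRange (d := (0 : Int)), List.foldl_map]
  rw [← key, hA]
  have h1 := score_eq num1A 5 (by norm_num) (by norm_num) (by decide) answers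
  have h2 := score_eq num2A 8 (by norm_num) (by norm_num) (by decide) answers
  have h3 := score_eq num3A 10 (by norm_num) (by norm_num) (by decide) answers
  have hs : patternsB.map (fun p =>
      ((PySem.List.pyRange 0 40 1).map
        (fun r => ((PySem.List.enumerate answers 0).foldl
          (fun (d : PySem.Dict (Int × Int) Int) ia =>
            d.insert (PySem.Int.mod ia.1 40, ia.2)
              (d.getD (PySem.Int.mod ia.1 40, ia.2) 0 + 1)) PySem.Dict.empty).getD
          (r, PySem.List.pyGetD p (PySem.Int.mod r (PySem.List.len p)) 0) 0)).sum)
      = [((PySem.List.enumerate answers 0).map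
            (fun ia => if ia.2 = PySem.List.pyGetD num1A (PySem.Int.mod ia.1 5) 0 then (1 : Int) else 0)).sum,
         ((PySem.List.enumerate answers 0).map
            (fun ia => if ia.2 = PySem.List.pyGetD num2A (PySem.Int.mod ia.1 8) 0 then (1 : Int) else 0)).sum,
         ((PySem.List.enumerate answers 0).map
            (fun ia => if ia.2 = PySem.List.pyGetD num3A (PySem.Int.mod ia.1 10) 0 then (1 : Int) else 0)).sum] := by
    simp only [patternsB]
    rw [List.map_cons, List.map_cons, List.map_cons, List.map_nil]
    exact congrArg₂ _ h1 (congrArg₂ _ h2 (congrArg₂ _ h3 rfl))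
  simp only [hs]
  exact winners_eq _ _ _ _
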